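-- pv_equiv track=rewrite | github.com/k-roy/RECTIFY | rectify/core/chimeric_consensus.py | compress_sync_runs
-- ===== SOURCE A (Python) =====
-- from typing import Dict, List, Optional, Tuple, Set
--
-- def compress_sync_runs(
--     sync_points: List[Tuple[int, int]],
-- ) -> List[Tuple[int, int, int, int]]:
--     """
--     Compress consecutive sync points into runs of agreement.
--
--     Returns list of (q_start, q_end, r_start, r_end) for contiguous
--     agreement regions. The gaps between these runs are the "disagreement
--     segments" where aligners diverge and chimeric selection matters.
--
--     Args:
--         sync_points: Sorted list of (query_pos, ref_pos) from find_sync_points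
--
--     Returns:
--         List of (q_start, q_end_exclusive, r_start, r_end_exclusive) runs
--     """
--     if not sync_points:
--         return []
--
--     runs = []
--     run_q_start, run_r_start = sync_points[0]
--     prev_q, prev_r = sync_points[0]
--
--     for q, r in sync_points[1:]:
--         if q == prev_q + 1 and r == prev_r + 1:
--             # Contiguous with previous
--             prev_q, prev_r = q, r
--         else:
--             # Gap: end current run, start new one
--             runs.append((run_q_start, prev_q + 1, run_r_start, prev_r + 1))
--             run_q_start, run_r_start = q, r
--             prev_q, prev_r = q, r
--
--     # Close last run
--     runs.append((run_q_start, prev_q + 1, run_r_start, prev_r + 1))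
--     return runs
-- ===== SOURCE B (Python) =====
-- from typing import List, Tuple
--
-- def compress_sync_runs(
--     sync_points: List[Tuple[int, int]],
-- ) -> List[Tuple[int, int, int, int]]:
--     """Build the runs back-to-front: traverse right-to-left and merge each
--     point into the most recently built (leftmost-so-far) run when it is
--     contiguous with that run's start; otherwise open a fresh one-point run.
--     No run-start/previous state is carried and there is no final flush."""
--     rev = []  # runs in reverse output order; rev[-1] is the leftmost run built so far
--     for q, r in reversed(sync_points):
--         if rev and rev[-1][0] == q + 1 and rev[-1][2] == r + 1:
--             _, qe, _, re_ = rev[-1]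
--             rev[-1] = (q, qe, r, re_)
--         else:
--             rev.append((q, q + 1, r, r + 1))
--     return rev[::-1]
-- ===== Notes on version B (the rewrite author's own statement) =====
-- stated objective: alternative
-- what changed: A is a left-to-right state machine carrying run-start/previous coordinates with append-on-break plus a final close; B builds the output back-to-front, traversing right-to-left and merging each point into the head (leftmost-so-far) run when contiguous, with no carried run state and no closing step.
import Mathlib
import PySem

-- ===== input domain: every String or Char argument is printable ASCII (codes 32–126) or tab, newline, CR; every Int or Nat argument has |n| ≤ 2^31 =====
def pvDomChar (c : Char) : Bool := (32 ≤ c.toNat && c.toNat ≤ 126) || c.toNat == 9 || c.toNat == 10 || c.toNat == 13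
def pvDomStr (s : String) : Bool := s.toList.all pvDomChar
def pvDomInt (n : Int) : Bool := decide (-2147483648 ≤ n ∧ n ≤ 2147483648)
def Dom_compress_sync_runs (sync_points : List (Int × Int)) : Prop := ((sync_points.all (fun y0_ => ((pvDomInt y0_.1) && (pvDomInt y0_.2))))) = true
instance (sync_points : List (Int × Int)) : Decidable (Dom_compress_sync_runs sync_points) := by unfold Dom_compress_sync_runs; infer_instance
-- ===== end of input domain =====

-- B replaces A's left-to-right run-start/previous state machine (append on break + final
-- close) by a right-to-left pass that builds the runs back-to-front, merging each point
-- into the most recently built run; same cost (objective: alternative).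

-- ===== PORT A =====
-- A's for-loop over sync_points[1:] with state (runs, run_q_start, run_r_start, prev_q, prev_r)
def loopA : List (Int × Int) → List (Int × Int × Int × Int) → Int → Int → Int → Int → List (Int × Int × Int × Int)
  | [], runs, qs, rs, pq, pr => runs ++ [(qs, pq + 1, rs, pr + 1)]
  | (q, r) :: rest, runs, qs, rs, pq, pr =>
    if q = pq + 1 ∧ r = pr + 1 then
      loopA rest runs qs rs q r
    else
      loopA rest (runs ++ [(qs, pq + 1, rs, pr + 1)]) q r q r

def compress_sync_runs (sync_points : List (Int × Int)) : List (Int × Int × Int × Int) :=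
  match sync_points with
  | [] => []
  | (q0, r0) :: rest => loopA rest [] q0 r0 q0 r0

-- ===== PORT B =====
-- B's loop body: Python's `rev` holds the runs most-recent-first here, so `rev[-1]`
-- (the leftmost run built so far) is the head, appending is cons, and the final
-- `rev[::-1]` is absorbed by the representation.
def stepB : (Int × Int) → List (Int × Int × Int × Int) → List (Int × Int × Int × Int)
  | (q, r), (q', qe, r', re) :: tl =>
    if q' = q + 1 ∧ r' = r + 1 then (q, qe, r, re) :: tl
    else (q, q + 1, r, r + 1) :: (q', qe, r', re) :: tl
  | (q, r), [] => [(q, q + 1, r, r + 1)]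

-- B's `for q, r in reversed(sync_points)` loop
def compress_sync_runs_alt (sync_points : List (Int × Int)) : List (Int × Int × Int × Int) :=
  (sync_points.reverse).foldl (fun rev p => stepB p rev) []

-- ===== PRECONDITION & SPEC =====
def Spec_compress_sync_runs (sync_points : List (Int × Int)) (out : List (Int × Int × Int × Int)) : Prop := out = compress_sync_runs_alt sync_points
instance (sync_points : List (Int × Int)) (out : List (Int × Int × Int × Int)) : Decidable (Spec_compress_sync_runs sync_points out) := by unfold Spec_compress_sync_runs; infer_instance

-- ===== CLAIM (what is proved, stated in full; the proofs are below) =====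
def Claim_equal_compress_sync_runs : Prop := ∀ (sync_points : List (Int × Int)), Dom_compress_sync_runs sync_points → Spec_compress_sync_runs sync_points (compress_sync_runs sync_points)

-- ===== LEMMAS AND PROOFS =====

-- B's foldl over the reversed list is a right fold
theorem alt_eq_foldr (xs : List (Int × Int)) :
    compress_sync_runs_alt xs = xs.foldr stepB [] := by
  unfold compress_sync_runs_alt
  rw [List.foldl_reverse]

-- "close the run (qs,rs,pq,pr) against the already-built suffix result L"
def finish (qs rs pq pr : Int) : List (Int × Int × Int × Int) → List (Int × Int × Int × Int)
  | (q', qe, r', re) :: tl =>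
    if q' = pq + 1 ∧ r' = pr + 1 then (qs, qe, rs, re) :: tl
    else (qs, pq + 1, rs, pr + 1) :: (q', qe, r', re) :: tl
  | [] => [(qs, pq + 1, rs, pr + 1)]

theorem stepB_eq_finish (q r : Int) (L : List (Int × Int × Int × Int)) :
    stepB (q, r) L = finish q r q r L := by
  cases L with
  | nil => simp [stepB, finish]
  | cons hd tl => obtain ⟨a, b, c, d⟩ := hd; simp [stepB, finish]

-- extending the current run: closing against the merged suffix is closing the extended run
theorem finish_stepB_contig (qs rs pq pr : Int) (L : List (Int × Int × Int × Int)) :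
    finish qs rs pq pr (stepB (pq + 1, pr + 1) L) = finish qs rs (pq + 1) (pr + 1) L := by
  cases L with
  | nil => simp [stepB, finish]
  | cons hd tl =>
    obtain ⟨a, b, c, d⟩ := hd
    by_cases h : a = pq + 1 + 1 ∧ c = pr + 1 + 1 <;> simp [stepB, finish, h]

-- a break: the closed run is prepended in front of the suffix result
theorem finish_stepB_break (qs rs pq pr q r : Int) (L : List (Int × Int × Int × Int))
    (h : ¬(q = pq + 1 ∧ r = pr + 1)) :
    finish qs rs pq pr (stepB (q, r) L) = (qs, pq + 1, rs, pr + 1) :: stepB (q, r) L := by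
  cases L with
  | nil => simp [stepB, finish, h]
  | cons hd tl =>
    obtain ⟨a, b, c, d⟩ := hd
    by_cases h2 : a = q + 1 ∧ c = r + 1 <;> simp [stepB, finish, h2, h]

-- main invariant: A's remaining loop equals closing its state against B's suffix result
theorem loopA_finish (rest : List (Int × Int)) (runs : List (Int × Int × Int × Int))
    (qs rs pq pr : Int) :
    loopA rest runs qs rs pq pr = runs ++ finish qs rs pq pr (rest.foldr stepB []) := by
  induction rest generalizing runs qs rs pq pr with
  | nil => simp [loopA, finish]
  | cons hd tl ih =>
    obtain ⟨q, r⟩ := hd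
    simp only [loopA, List.foldr_cons]
    split
    · rename_i h
      obtain ⟨hq, hr⟩ := h
      subst hq hr
      rw [ih, finish_stepB_contig]
    · rename_i h
      rw [ih, finish_stepB_break qs rs pq pr q r _ h, stepB_eq_finish]
      simp

-- ===== VERDICT (by name: the statement is the Claim_ definition above) =====
theorem compress_sync_runs_spec : Claim_equal_compress_sync_runs := by
  intro sync_points _
  unfold Spec_compress_sync_runs
  rw [alt_eq_foldr]
  match sync_points with
  | [] => simp [compress_sync_runs]
  | (q0, r0) :: rest =>
    simp only [compress_sync_runs, List.foldr_cons]
    rw [loopA_finish rest [] q0 r0 q0 r0, stepB_eq_finish]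
    simp
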